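-- pv_equiv track=rewrite | github.com/BaziqDS/ams-backend | inventory/views/utils.py | _split_scope_tokens
-- ===== SOURCE A (Python) =====
-- def _split_scope_tokens(raw_tokens):
--     tokens = []
--     for raw in raw_tokens or []:
--         for token in str(raw).split(','):
--             token = token.strip()
--             if token:
--                 tokens.append(token)
--     return tokens
-- ===== SOURCE B (Python) =====
-- def _split_scope_tokens(raw_tokens):
--     s = ",".join(str(r) for r in (raw_tokens or []))
--     return [t for t in (p.strip() for p in s.split(",")) if t]
-- ===== Notes on version B (the rewrite author's own statement) =====
-- stated objective: simpler
-- what changed: Replaces the nested per-element split loop by joining all tokens into one comma-separated string, splitting it once, and filtering stripped pieces in a single comprehension.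
import Mathlib
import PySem

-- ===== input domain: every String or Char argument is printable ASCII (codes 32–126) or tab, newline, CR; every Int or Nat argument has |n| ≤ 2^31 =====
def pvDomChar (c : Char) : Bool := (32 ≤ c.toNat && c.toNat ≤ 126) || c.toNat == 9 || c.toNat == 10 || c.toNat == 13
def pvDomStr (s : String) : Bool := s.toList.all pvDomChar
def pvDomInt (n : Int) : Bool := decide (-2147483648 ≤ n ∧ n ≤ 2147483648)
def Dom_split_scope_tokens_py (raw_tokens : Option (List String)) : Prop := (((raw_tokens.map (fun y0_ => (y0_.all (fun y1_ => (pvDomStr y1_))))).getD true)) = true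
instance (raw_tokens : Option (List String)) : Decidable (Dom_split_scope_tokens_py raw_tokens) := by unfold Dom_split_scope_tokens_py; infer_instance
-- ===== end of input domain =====

-- B joins all tokens into one comma-separated string, splits it once and filters the
-- stripped pieces in a single comprehension (objective: simpler decomposition; same cost).

-- ===== PORT A =====
-- A: tokens = []; for raw in raw_tokens or []: for token in str(raw).split(','):
--    token = token.strip(); if token: tokens.append(token); return tokens
-- str(raw) is the identity on str; split(',') with the nonempty literal separator is
-- PySem.Chars.splitOn · [','] (the sep ≠ "" case of Python's str.split(sep)).
def split_scope_tokens_py (raw_tokens : Option (List String)) : List String :=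
  (raw_tokens.getD []).foldl
    (fun tokens raw =>
      (PySem.Chars.splitOn raw.toList [',']).foldl
        (fun tokens tok =>
          let token := PySem.Chars.strip tok
          if token.isEmpty then tokens else tokens ++ [String.ofList token])
        tokens)
    []

-- ===== PORT B =====
-- B: s = ",".join(str(r) for r in (raw_tokens or [])); return [t for t in (p.strip() for p in s.split(",")) if t]
def split_scope_tokens_py_alt (raw_tokens : Option (List String)) : List String :=
  let s := PySem.Chars.join [','] ((raw_tokens.getD []).map String.toList)
  (((PySem.Chars.splitOn s [',']).map PySem.Chars.strip).filter
      (fun t => !t.isEmpty)).map String.ofList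

-- ===== PRECONDITION & SPEC =====
def Spec_split_scope_tokens_py (raw_tokens : Option (List String)) (out : List String) : Prop := out = split_scope_tokens_py_alt raw_tokens
instance (raw_tokens : Option (List String)) (out : List String) : Decidable (Spec_split_scope_tokens_py raw_tokens out) := by unfold Spec_split_scope_tokens_py; infer_instance

-- ===== CLAIM (what is proved, stated in full; the proofs are below) =====
def Claim_equal_split_scope_tokens_py : Prop := ∀ (raw_tokens : Option (List String)), Dom_split_scope_tokens_py raw_tokens → Spec_split_scope_tokens_py raw_tokens (split_scope_tokens_py raw_tokens)

-- ===== LEMMAS AND PROOFS =====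

-- PySem's fuel-based splitOn with a single-char separator is Mathlib's List.splitOn.
lemma pv_go_eq (c : Char) : ∀ (fuel : Nat) (l cur : List Char) (acc : List (List Char)),
    l.length ≤ fuel →
    PySem.Chars.splitOn.go [c] fuel l cur acc
      = acc.reverse ++ (List.splitOnP (· == c) l).modifyHead (cur.reverse ++ ·) := by
  intro fuel
  induction fuel with
  | zero =>
    intro l cur acc h
    have : l = [] := List.eq_nil_of_length_eq_zero (Nat.le_zero.mp h)
    subst this
    simp [PySem.Chars.splitOn.go, List.splitOnP_nil]
  | succ f ih =>
    intro l cur acc h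
    cases l with
    | nil => simp [PySem.Chars.splitOn.go, List.splitOnP_nil]
    | cons x rest =>
      by_cases hx : x = c
      · subst hx
        have hpre : List.isPrefixOf [x] (x :: rest) = true := by simp [List.isPrefixOf]
        simp only [PySem.Chars.splitOn.go, hpre, if_pos, List.length_cons,
          List.length_nil, Nat.zero_add, List.drop_succ_cons, List.drop_zero]
        rw [ih rest [] (cur.reverse :: acc) (by simpa using Nat.le_of_succ_le_succ h)]
        have hid : List.modifyHead (fun x : List Char => x) (List.splitOnP (fun y => y == x) rest) = List.splitOnP (fun y => y == x) rest := by
          obtain ⟨hd, tl, hr⟩ := List.exists_cons_of_ne_nil (List.splitOnP_ne_nil (fun y => y == x) rest)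
          simp [hr]
        simp [List.splitOnP_cons, hid]
      · have hpre : List.isPrefixOf [c] (x :: rest) = false := by
          simp only [List.isPrefixOf, Bool.and_eq_false_iff]
          left; exact beq_eq_false_iff_ne.mpr (fun hc => hx hc.symm)
        simp only [PySem.Chars.splitOn.go, hpre]
        rw [ih rest (x :: cur) acc (by simpa using Nat.le_of_succ_le_succ h)]
        obtain ⟨hd, tl, hrest⟩ := List.exists_cons_of_ne_nil (List.splitOnP_ne_nil (· == c) rest)
        simp [List.splitOnP_cons, hrest, hx]

lemma pv_splitOn_eq (c : Char) (s : List Char) :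
    PySem.Chars.splitOn s [c] = List.splitOn c s := by
  unfold PySem.Chars.splitOn List.splitOn
  rw [pv_go_eq c (s.length + 1) s [] [] (by omega)]
  obtain ⟨hd, tl, hr⟩ := List.exists_cons_of_ne_nil (List.splitOnP_ne_nil (· == c) s)
  simp [hr]

-- the strip/filter/ofList pipeline both programs apply to a list of raw pieces
def pvKeep (parts : List (List Char)) : List String :=
  ((parts.map PySem.Chars.strip).filter (fun t => !t.isEmpty)).map String.ofList

lemma pvKeep_append (xs ys : List (List Char)) :
    pvKeep (xs ++ ys) = pvKeep xs ++ pvKeep ys := by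
  simp [pvKeep]

lemma pv_innerA (parts : List (List Char)) : ∀ (acc : List String),
    parts.foldl
      (fun tokens tok =>
        let token := PySem.Chars.strip tok
        if token.isEmpty then tokens else tokens ++ [String.ofList token]) acc
      = acc ++ pvKeep parts := by
  induction parts with
  | nil => simp [pvKeep]
  | cons p ps ih =>
    intro acc
    simp only [List.foldl_cons, ih]
    by_cases hp : (PySem.Chars.strip p).isEmpty
    · simp [pvKeep, hp]
    · simp [pvKeep, hp]

lemma pv_foldl_append (f : String → List String) :
    ∀ (lst : List String) (acc : List String),
      lst.foldl (fun a x => a ++ f x) acc = acc ++ lst.flatMap f := by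
  intro lst
  induction lst with
  | nil => simp
  | cons r rs ih => intro acc; simp [ih]

lemma pv_splitOn_intercalate_flatMap (c : Char) :
    ∀ (ls : List (List Char)), ls ≠ [] →
      List.splitOn c ([c].intercalate ls) = ls.flatMap (List.splitOn c) := by
  intro ls
  induction ls with
  | nil => intro h; exact absurd rfl h
  | cons a t ih =>
    intro _
    cases t with
    | nil => simp [List.intercalate]
    | cons b t' =>
      have hstep : [c].intercalate (a :: b :: t') = a ++ c :: [c].intercalate (b :: t') := by
        simp [List.intercalate, List.intersperse]
      rw [hstep]
      have : List.splitOn c (a ++ c :: [c].intercalate (b :: t'))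
          = List.splitOn c a ++ List.splitOn c ([c].intercalate (b :: t')) := by
        simp only [List.splitOn]
        exact List.splitOnP_append_cons _ a _ c (by simp)
      rw [this, ih (by simp)]
      simp

lemma pvKeep_flatMap (g : String → List (List Char)) :
    ∀ (lst : List String),
      pvKeep (lst.flatMap g) = lst.flatMap (fun r => pvKeep (g r)) := by
  intro lst
  induction lst with
  | nil => simp [pvKeep]
  | cons r rs ih => simp only [List.flatMap_cons, pvKeep_append, ih]

-- ===== VERDICT (by name: the statement is the Claim_ definition above) =====
theorem split_scope_tokens_py_spec : Claim_equal_split_scope_tokens_py := by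
  intro raw_tokens _
  unfold Spec_split_scope_tokens_py split_scope_tokens_py split_scope_tokens_py_alt
  simp only [pv_innerA, pv_splitOn_eq]
  rw [pv_foldl_append (fun raw => pvKeep (List.splitOn ',' raw.toList))]
  cases hl : raw_tokens.getD [] with
  | nil => decide
  | cons a t =>
    show (a :: t).flatMap (fun raw => pvKeep (List.splitOn ',' raw.toList))
      = pvKeep (List.splitOn ',' (PySem.Chars.join [','] ((a :: t).map String.toList)))
    have hjoin : PySem.Chars.join [','] ((a :: t).map String.toList)
        = [','].intercalate ((a :: t).map String.toList) := rfl
    rw [hjoin, pv_splitOn_intercalate_flatMap ',' _ (by simp),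
      List.flatMap_map, pvKeep_flatMap (fun r => List.splitOn ',' r.toList)]
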